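-- pv_equiv track=rewrite | github.com/Attyuttam/cp-practice | TLE eliminators/.ipynb_checkpoints/jupyter_template-checkpoint.py | solution
-- ===== SOURCE A (Python) =====
-- def solution(n, arr):
--     i = 1
--     sum = 0
--     while i < n:
--         sum += arr[i] - arr[i-1]
--         i += 1
--     if sum > 0:
--         return "YES"
--     return "NO"
-- ===== SOURCE B (Python) =====
-- def solution(n, arr):
--     # The consecutive differences telescope: their sum is arr[n-1] - arr[0].
--     if n >= 2:
--         return "YES" if arr[n - 1] - arr[0] > 0 else "NO"
--     return "NO"
-- ===== Notes on version B (the rewrite author's own statement) =====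
-- stated objective: faster
-- what changed: replaced the O(n) loop summing consecutive differences by the closed-form telescoped value arr[n-1]-arr[0]
import Mathlib
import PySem

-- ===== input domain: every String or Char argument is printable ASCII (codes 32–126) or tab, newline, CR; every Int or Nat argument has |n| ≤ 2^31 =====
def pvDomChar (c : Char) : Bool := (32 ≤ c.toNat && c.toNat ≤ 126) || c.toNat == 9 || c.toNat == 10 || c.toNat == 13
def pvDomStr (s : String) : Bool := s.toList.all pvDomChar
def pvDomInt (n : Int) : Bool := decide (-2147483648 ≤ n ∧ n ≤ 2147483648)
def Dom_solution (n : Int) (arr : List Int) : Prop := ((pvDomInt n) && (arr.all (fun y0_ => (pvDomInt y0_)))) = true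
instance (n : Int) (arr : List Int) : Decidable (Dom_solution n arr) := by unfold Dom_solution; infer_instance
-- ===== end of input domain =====

-- B replaces A's O(n) loop over consecutive differences by the telescoped closed form arr[n-1]-arr[0]; objective: faster.


-- ===== PORT A =====
-- the while loop: state (i, sum); arr[i] is a pyGet? (Pre_ guarantees it is in range)
def solLoop (n : Int) (arr : List Int) (i : Int) (sum : Int) : Int :=
  if _h : i < n then
    solLoop n arr (i + 1) (sum + (((PySem.List.pyGet? arr i).getD 0) - ((PySem.List.pyGet? arr (i - 1)).getD 0)))
  else sum
termination_by (n - i).toNat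
decreasing_by omega

def solution (n : Int) (arr : List Int) : String :=
  if solLoop n arr 1 0 > 0 then "YES" else "NO"

-- ===== PORT B =====
def solution_alt (n : Int) (arr : List Int) : String :=
  if 2 ≤ n then
    if ((PySem.List.pyGet? arr (n - 1)).getD 0) - ((PySem.List.pyGet? arr 0).getD 0) > 0 then "YES" else "NO"
  else "NO"

-- ===== PRECONDITION & SPEC =====
-- Pre_ excludes exactly the inputs on which Python A raises IndexError (n ≥ 2 with n > len(arr)).
def Pre_solution (n : Int) (arr : List Int) : Prop := n ≤ 1 ∨ n ≤ (arr.length : Int)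
instance (n : Int) (arr : List Int) : Decidable (Pre_solution n arr) := by unfold Pre_solution; infer_instance
def pvWitness_solution : Int × List Int := (3, [1, 5, 2])
def Spec_solution (n : Int) (arr : List Int) (out : String) : Prop := out = solution_alt n arr
instance (n : Int) (arr : List Int) (out : String) : Decidable (Spec_solution n arr out) := by unfold Spec_solution; infer_instance

-- ===== CLAIM (what is proved, stated in full; the proofs are below) =====
def Claim_equal_solution : Prop := ∀ (n : Int) (arr : List Int), Dom_solution n arr → Pre_solution n arr → Spec_solution n arr (solution n arr)

-- ===== LEMMAS AND PROOFS =====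
-- telescoping invariant of A's loop
theorem solLoop_telescope (n : Int) (arr : List Int) :
    ∀ (k : Nat) (i sum : Int), (n - i).toNat = k → 1 ≤ i → i ≤ n → n ≤ (arr.length : Int) →
    solLoop n arr i sum = sum + (((PySem.List.pyGet? arr (n - 1)).getD 0) - ((PySem.List.pyGet? arr (i - 1)).getD 0)) := by
  intro k
  induction k with
  | zero =>
    intro i sum hk h1 hin hlen
    have : i = n := by omega
    subst this
    rw [solLoop]
    simp
  | succ m ih =>
    intro i sum hk h1 hin hlen
    have hlt : i < n := by omega
    rw [solLoop]
    rw [dif_pos hlt]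
    rw [ih (i + 1) _ (by omega) (by omega) (by omega) hlen]
    have : i + 1 - 1 = i := by ring
    rw [this]
    ring

-- ===== VERDICT (by name: the statement is the Claim_ definition above) =====
theorem solution_spec : Claim_equal_solution := by
  intro n arr _hdom hpre
  unfold Spec_solution solution solution_alt
  by_cases h2 : 2 ≤ n
  · have hlen : n ≤ (arr.length : Int) := by cases hpre with
      | inl h => omega
      | inr h => exact h
    rw [solLoop_telescope n arr (n - 1).toNat 1 0 (by omega) (by omega) (by omega) hlen]
    simp [if_pos h2]
  · rw [solLoop]
    rw [dif_neg (by omega)]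
    simp [if_neg h2]
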